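-- pv_equiv track=rewrite | github.com/thinking024/DM_Python | associate/test.py | getSublist
-- ===== SOURCE A (Python) =====
-- def getSublist(items):
--     n = len(items)
--     sublist = []
--     for i in range(2 ** n):  # 子集个数，每循环一次一个子集
--         combo = []
--         for j in range(n):  # 用来判断二进制下标为j的位置数是否为1
--             if(i >> j) % 2:
--                 combo.append(items[j])
--         if len(combo) > 0 and len(combo) < len(items):  # 获取非空真子集
--             sublist.append(combo)
--         # sublist.append(combo)
--     return sublist
-- ===== SOURCE B (Python) =====
-- def getSublist(items):
--     # Build the full powerset by iterative doubling (same order as bitmask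
--     # enumeration: low bit = first item), then keep nonempty proper subsets.
--     result = [[]]
--     for item in items:
--         result = result + [sub + [item] for sub in result]
--     return [sub for sub in result if 0 < len(sub) < len(items)]
-- ===== Notes on version B (the rewrite author's own statement) =====
-- stated objective: simpler
-- what changed: Replaces the bitmask double loop (test each of n bits of each counter value) with an iterative powerset-doubling fold plus one final filter, producing the same order without any bit arithmetic.
import Mathlib
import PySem

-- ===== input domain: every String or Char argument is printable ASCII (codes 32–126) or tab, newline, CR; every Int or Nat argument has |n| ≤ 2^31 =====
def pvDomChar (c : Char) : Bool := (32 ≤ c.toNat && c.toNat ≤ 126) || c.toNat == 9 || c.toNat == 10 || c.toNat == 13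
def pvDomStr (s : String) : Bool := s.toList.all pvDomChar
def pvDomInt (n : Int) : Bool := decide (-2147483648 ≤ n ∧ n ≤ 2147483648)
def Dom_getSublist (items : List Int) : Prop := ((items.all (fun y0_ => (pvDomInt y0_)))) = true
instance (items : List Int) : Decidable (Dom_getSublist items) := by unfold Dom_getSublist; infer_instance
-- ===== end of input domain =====

-- B replaces A's bitmask double loop by an iterative powerset-doubling fold plus one filter (simpler).

-- ===== PORT A =====
-- inner loop of A: build combo from the bits of i (bit j set → take items[j])
def pvCombo (items : List Int) (i : Nat) : List Int :=
  (List.range items.length).foldl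
    (fun combo j => if (i >>> j) % 2 = 1 then combo ++ [items.getD j 0] else combo) []

def getSublist (items : List Int) : List (List Int) :=
  (List.range (2 ^ items.length)).foldl
    (fun sublist i =>
      if 0 < (pvCombo items i).length && (pvCombo items i).length < items.length then
        sublist ++ [pvCombo items i]
      else sublist) []

-- ===== PORT B =====
-- one doubling step: result = result + [sub + [item] for sub in result]
def pvDouble (r : List (List Int)) (x : Int) : List (List Int) :=
  r ++ r.map (fun sub => sub ++ [x])

def getSublist_alt (items : List Int) : List (List Int) :=
  (items.foldl pvDouble [[]]).filter
    (fun sub => 0 < sub.length && sub.length < items.length)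

-- ===== PRECONDITION & SPEC =====
def Spec_getSublist (items : List Int) (out : List (List Int)) : Prop := out = getSublist_alt items
instance (items : List Int) (out : List (List Int)) : Decidable (Spec_getSublist items out) := by unfold Spec_getSublist; infer_instance

-- ===== CLAIM (what is proved, stated in full; the proofs are below) =====
def Claim_equal_getSublist : Prop := ∀ (items : List Int), Dom_getSublist items → Spec_getSublist items (getSublist items)

-- ===== LEMMAS AND PROOFS =====

theorem pvBit_low {n j i : Nat} (hj : j < n) : ((2 ^ n + i) >>> j) % 2 = (i >>> j) % 2 := by
  have h : 2 ^ n = 2 ^ (n - j - 1) * 2 * 2 ^ j := by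
    rw [mul_assoc, ← pow_succ']
    rw [← pow_add]
    congr 1
    omega
  simp only [Nat.shiftRight_eq_div_pow, h]
  rw [mul_comm (2 ^ (n - j - 1) * 2) (2 ^ j), Nat.mul_add_div (Nat.two_pow_pos j)]
  omega

theorem pvBit_high {n i : Nat} (hi : i < 2 ^ n) : ((2 ^ n + i) >>> n) % 2 = 1 := by
  simp only [Nat.shiftRight_eq_div_pow]
  rw [Nat.add_div_left _ (Nat.two_pow_pos n), Nat.div_eq_of_lt hi]

theorem pvBit_top {n i : Nat} (hi : i < 2 ^ n) : (i >>> n) % 2 = 0 := by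
  simp only [Nat.shiftRight_eq_div_pow]
  rw [Nat.div_eq_of_lt hi]

-- combo over xs ++ [x] with i < 2^n ignores the new top bit
theorem pvCombo_append_low (xs : List Int) (x : Int) {i : Nat} (hi : i < 2 ^ xs.length) :
    pvCombo (xs ++ [x]) i = pvCombo xs i := by
  unfold pvCombo
  rw [List.length_append, List.length_singleton, List.range_succ, List.foldl_append]
  have h : (List.range xs.length).foldl
      (fun combo j => if (i >>> j) % 2 = 1 then combo ++ [(xs ++ [x]).getD j 0] else combo) [] =
      (List.range xs.length).foldl
      (fun combo j => if (i >>> j) % 2 = 1 then combo ++ [xs.getD j 0] else combo) [] := by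
    apply PySem.List.foldl_congr_mem
    intro acc j hj
    rw [List.mem_range] at hj
    rw [List.getD_append _ _ _ _ hj]
  rw [h]
  simp [pvBit_top hi]

-- combo over xs ++ [x] with 2^n + i appends x after the old combo
theorem pvCombo_append_high (xs : List Int) (x : Int) {i : Nat} (hi : i < 2 ^ xs.length) :
    pvCombo (xs ++ [x]) (2 ^ xs.length + i) = pvCombo xs i ++ [x] := by
  unfold pvCombo
  rw [List.length_append, List.length_singleton, List.range_succ, List.foldl_append]
  have h : (List.range xs.length).foldl
      (fun combo j => if ((2 ^ xs.length + i) >>> j) % 2 = 1 then combo ++ [(xs ++ [x]).getD j 0] else combo) [] =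
      (List.range xs.length).foldl
      (fun combo j => if (i >>> j) % 2 = 1 then combo ++ [xs.getD j 0] else combo) [] := by
    apply PySem.List.foldl_congr_mem
    intro acc j hj
    rw [List.mem_range] at hj
    rw [List.getD_append _ _ _ _ hj, pvBit_low hj]
  rw [h]
  simp [pvBit_high hi]

-- the bitmask enumeration equals the doubling fold
theorem pvPow_eq (items : List Int) :
    (List.range (2 ^ items.length)).map (pvCombo items) = items.foldl pvDouble [[]] := by
  induction items using List.reverseRecOn with
  | nil => decide
  | append_singleton xs x ih =>
    rw [List.foldl_append, List.foldl_cons, List.foldl_nil, ← ih]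
    rw [List.length_append, List.length_singleton, pow_succ, mul_two, List.range_add]
    rw [List.map_append, List.map_map]
    unfold pvDouble
    congr 1
    · apply List.map_congr_left
      intro i hi
      exact pvCombo_append_low xs x (List.mem_range.mp hi)
    · rw [List.map_map]
      apply List.map_congr_left
      intro i hi
      exact pvCombo_append_high xs x (List.mem_range.mp hi)

-- ===== VERDICT (by name: the statement is the Claim_ definition above) =====
theorem getSublist_spec : Claim_equal_getSublist := by
  intro items _
  show getSublist items = getSublist_alt items
  unfold getSublist getSublist_alt
  rw [PySem.List.foldl_append_if
      (fun i => 0 < (pvCombo items i).length && (pvCombo items i).length < items.length)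
      (pvCombo items), List.nil_append, ← pvPow_eq items, List.filter_map]
  rfl
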